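-- pv_equiv track=rewrite | github.com/Zachanardo/Intellicrack | intellicrack/protection/themida_analyzer.py | _categorize_handler
-- ===== SOURCE A (Python) =====
-- def _categorize_handler(instructions: list[tuple[int, str, str]]) -> str:
--     """Categorize handler based on instruction patterns.
--
--     Args:
--         instructions: List of (address, mnemonic, operands) tuples.
--
--     Returns:
--         Handler category string (arithmetic, logical, data_transfer, etc.).
--     """
--     if not instructions:
--         return "unknown"
--
--     mnemonics = [insn[1] for insn in instructions]
--     operands = [insn[2] for insn in instructions]
--
--     if any("fs:[0x30]" in op or "gs:[0x30]" in op for op in operands):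
--         return "anti_debug"
--     if "rdtsc" in mnemonics:
--         return "anti_debug"
--     if any(m in ["cpuid"] for m in mnemonics):
--         return "anti_debug"
--
--     if any(m in ["add", "sub", "mul", "imul", "div", "idiv"] for m in mnemonics):
--         return "arithmetic"
--     if any(m in ["and", "or", "xor", "not", "shl", "shr", "rol", "ror"] for m in mnemonics):
--         return "logical"
--     if any(m in ["mov", "movzx", "movsx", "lea"] for m in mnemonics):
--         return "data_transfer"
--     if any(m in ["cmp", "test"] for m in mnemonics):
--         return "comparison"
--     if any(m in ["jmp", "je", "jne", "jg", "jl", "ja", "jb", "call"] for m in mnemonics):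
--         return "control_flow"
--     if any(m in ["push", "pop"] for m in mnemonics):
--         return "stack_operation"
--     return "complex"
-- ===== SOURCE B (Python) =====
-- # B: single classification pass (mnemonic->rank dict, per-instruction anti-debug test),
-- # reduced with min over a fixed priority order, instead of seven separate any() scans.
-- _MNEM_RANK = {
--     "add": 1, "sub": 1, "mul": 1, "imul": 1, "div": 1, "idiv": 1,
--     "and": 2, "or": 2, "xor": 2, "not": 2, "shl": 2, "shr": 2, "rol": 2, "ror": 2,
--     "mov": 3, "movzx": 3, "movsx": 3, "lea": 3,
--     "cmp": 4, "test": 4,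
--     "jmp": 5, "je": 5, "jne": 5, "jg": 5, "jl": 5, "ja": 5, "jb": 5, "call": 5,
--     "push": 6, "pop": 6,
-- }
--
-- _NAMES = ["anti_debug", "arithmetic", "logical", "data_transfer",
--           "comparison", "control_flow", "stack_operation", "complex"]
--
--
-- def _rank(mnemonic, operands):
--     if "fs:[0x30]" in operands or "gs:[0x30]" in operands:
--         return 0
--     if mnemonic == "rdtsc" or mnemonic == "cpuid":
--         return 0
--     return _MNEM_RANK.get(mnemonic, 7)
--
--
-- def _categorize_handler(instructions):
--     if not instructions:
--         return "unknown"
--     best = 7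
--     for _, mnemonic, operands in instructions:
--         best = min(best, _rank(mnemonic, operands))
--     return _NAMES[best]
-- ===== Notes on version B (the rewrite author's own statement) =====
-- stated objective: alternative
-- what changed: Replaces seven sequential any() scans over the whole instruction list by a single pass that classifies each instruction to a priority rank via a mnemonic->rank dict (with a per-instruction anti-debug test) and returns the name of the minimum rank.
import Mathlib
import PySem

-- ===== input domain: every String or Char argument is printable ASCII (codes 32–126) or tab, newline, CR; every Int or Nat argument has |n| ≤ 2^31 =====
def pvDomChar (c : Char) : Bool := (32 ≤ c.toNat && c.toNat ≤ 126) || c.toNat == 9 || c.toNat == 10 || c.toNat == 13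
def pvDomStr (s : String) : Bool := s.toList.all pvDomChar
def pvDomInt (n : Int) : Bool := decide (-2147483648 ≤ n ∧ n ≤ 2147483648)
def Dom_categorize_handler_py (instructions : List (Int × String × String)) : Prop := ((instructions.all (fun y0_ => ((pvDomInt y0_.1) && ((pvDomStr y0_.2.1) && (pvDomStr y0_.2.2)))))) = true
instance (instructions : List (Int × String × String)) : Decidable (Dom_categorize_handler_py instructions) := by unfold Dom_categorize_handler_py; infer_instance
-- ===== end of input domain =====

-- B replaces A's seven whole-list any() scans by one pass that ranks each instruction
-- via a mnemonic→rank dictionary and returns the name of the minimum rank (alternative decomposition).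

-- ===== PORT A =====
def categorize_handler_py (instructions : List (Int × String × String)) : String :=
  if instructions.isEmpty then "unknown" else
    let mnemonics := instructions.map (fun insn => insn.2.1)
    let operands := instructions.map (fun insn => insn.2.2)
    if operands.any (fun op => PySem.Str.isIn "fs:[0x30]" op || PySem.Str.isIn "gs:[0x30]" op) then "anti_debug"
    else if mnemonics.contains "rdtsc" then "anti_debug"
    else if mnemonics.any (fun m => ["cpuid"].contains m) then "anti_debug"
    else if mnemonics.any (fun m => ["add","sub","mul","imul","div","idiv"].contains m) then "arithmetic"
    else if mnemonics.any (fun m => ["and","or","xor","not","shl","shr","rol","ror"].contains m) then "logical"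
    else if mnemonics.any (fun m => ["mov","movzx","movsx","lea"].contains m) then "data_transfer"
    else if mnemonics.any (fun m => ["cmp","test"].contains m) then "comparison"
    else if mnemonics.any (fun m => ["jmp","je","jne","jg","jl","ja","jb","call"].contains m) then "control_flow"
    else if mnemonics.any (fun m => ["push","pop"].contains m) then "stack_operation"
    else "complex"

-- ===== PORT B =====
def pvRankTable : PySem.Dict String Nat := PySem.Dict.mk [
  ("add",1),("sub",1),("mul",1),("imul",1),("div",1),("idiv",1),
  ("and",2),("or",2),("xor",2),("not",2),("shl",2),("shr",2),("rol",2),("ror",2),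
  ("mov",3),("movzx",3),("movsx",3),("lea",3),
  ("cmp",4),("test",4),
  ("jmp",5),("je",5),("jne",5),("jg",5),("jl",5),("ja",5),("jb",5),("call",5),
  ("push",6),("pop",6)]

def pvNames : List String :=
  ["anti_debug", "arithmetic", "logical", "data_transfer", "comparison", "control_flow", "stack_operation", "complex"]

def pvRank (mnemonic operands : String) : Nat :=
  if PySem.Str.isIn "fs:[0x30]" operands || PySem.Str.isIn "gs:[0x30]" operands then 0
  else if mnemonic == "rdtsc" || mnemonic == "cpuid" then 0
  else pvRankTable.getD mnemonic 7

def categorize_handler_py_alt (instructions : List (Int × String × String)) : String :=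
  if instructions.isEmpty then "unknown"
  else
    -- _NAMES[best]: best ≤ 7 always, so the in-range List.getD is exact for the Python indexing
    pvNames.getD (instructions.foldl (fun best insn => min best (pvRank insn.2.1 insn.2.2)) 7) ""

-- ===== PRECONDITION & SPEC =====
def Spec_categorize_handler_py (instructions : List (Int × String × String)) (out : String) : Prop := out = categorize_handler_py_alt instructions
instance (instructions : List (Int × String × String)) (out : String) : Decidable (Spec_categorize_handler_py instructions out) := by unfold Spec_categorize_handler_py; infer_instance

-- ===== CLAIM (what is proved, stated in full; the proofs are below) =====
def Claim_equal_categorize_handler_py : Prop := ∀ (instructions : List (Int × String × String)), Dom_categorize_handler_py instructions → Spec_categorize_handler_py instructions (categorize_handler_py instructions)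

-- ===== LEMMAS AND PROOFS =====

-- the if-chain the rank dictionary computes
def pvRnk (m : String) : Nat :=
  if m ∈ ["add","sub","mul","imul","div","idiv"] then 1
  else if m ∈ ["and","or","xor","not","shl","shr","rol","ror"] then 2
  else if m ∈ ["mov","movzx","movsx","lea"] then 3
  else if m ∈ ["cmp","test"] then 4
  else if m ∈ ["jmp","je","jne","jg","jl","ja","jb","call"] then 5
  else if m ∈ ["push","pop"] then 6
  else 7

theorem tbl (m : String) : pvRankTable.getD m 7 = pvRnk m := by
  by_cases h1 : m ∈ ["add","sub","mul","imul","div","idiv"]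
  · fin_cases h1 <;> decide
  by_cases h2 : m ∈ ["and","or","xor","not","shl","shr","rol","ror"]
  · fin_cases h2 <;> decide
  by_cases h3 : m ∈ ["mov","movzx","movsx","lea"]
  · fin_cases h3 <;> decide
  by_cases h4 : m ∈ ["cmp","test"]
  · fin_cases h4 <;> decide
  by_cases h5 : m ∈ ["jmp","je","jne","jg","jl","ja","jb","call"]
  · fin_cases h5 <;> decide
  by_cases h6 : m ∈ ["push","pop"]
  · fin_cases h6 <;> decide
  simp only [List.mem_cons, not_or] at h1 h2 h3 h4 h5 h6
  obtain ⟨h1_0, h1_1, h1_2, h1_3, h1_4, h1_5⟩ := h1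
  obtain ⟨h2_0, h2_1, h2_2, h2_3, h2_4, h2_5, h2_6, h2_7⟩ := h2
  obtain ⟨h3_0, h3_1, h3_2, h3_3⟩ := h3
  obtain ⟨h4_0, h4_1⟩ := h4
  obtain ⟨h5_0, h5_1, h5_2, h5_3, h5_4, h5_5, h5_6, h5_7⟩ := h5
  obtain ⟨h6_0, h6_1⟩ := h6
  simp [pvRnk, pvRankTable, PySem.Dict.getD_eq_get?_getD, PySem.Dict.get?,
        Ne.symm h1_0, Ne.symm h1_1, Ne.symm h1_2, Ne.symm h1_3, Ne.symm h1_4, Ne.symm h1_5.1, h1_0, h1_1, h1_2, h1_3, h1_4, h1_5.1, Ne.symm h2_0, Ne.symm h2_1, Ne.symm h2_2, Ne.symm h2_3, Ne.symm h2_4, Ne.symm h2_5, Ne.symm h2_6, Ne.symm h2_7.1, h2_0, h2_1, h2_2, h2_3, h2_4, h2_5, h2_6, h2_7.1, Ne.symm h3_0, Ne.symm h3_1, Ne.symm h3_2, Ne.symm h3_3.1, h3_0, h3_1, h3_2, h3_3.1, Ne.symm h4_0, Ne.symm h4_1.1, h4_0, h4_1.1, Ne.symm h5_0, Ne.symm h5_1,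 Ne.symm h5_2, Ne.symm h5_3, Ne.symm h5_4, Ne.symm h5_5, Ne.symm h5_6, Ne.symm h5_7.1, h5_0, h5_1, h5_2, h5_3, h5_4, h5_5, h5_6, h5_7.1, Ne.symm h6_0, Ne.symm h6_1.1, h6_0, h6_1.1]

theorem rank_zero_of_anti (m op : String)
    (h : (PySem.Str.isIn "fs:[0x30]" op || PySem.Str.isIn "gs:[0x30]" op) = true) :
    pvRank m op = 0 := by
  unfold pvRank; rw [if_pos h]

theorem rank_zero_of_mnem (m op : String) (h : m = "rdtsc" ∨ m = "cpuid") :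
    pvRank m op = 0 := by
  unfold pvRank; rcases h with rfl | rfl <;> split_ifs <;> simp_all

theorem rank_of_clean (m op : String)
    (hop : ¬ ((PySem.Str.isIn "fs:[0x30]" op || PySem.Str.isIn "gs:[0x30]" op) = true))
    (h1 : m ≠ "rdtsc") (h2 : m ≠ "cpuid") :
    pvRank m op = pvRnk m := by
  unfold pvRank; rw [if_neg hop, if_neg (by simp [h1, h2]), tbl]

theorem fold_eq (l : List (Int × String × String)) (j : Nat) (hj : j ≤ 7)
    (hub : ∃ x ∈ l, pvRank x.2.1 x.2.2 ≤ j)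
    (hlb : ∀ x ∈ l, j ≤ pvRank x.2.1 x.2.2) :
    l.foldl (fun best insn => min best (pvRank insn.2.1 insn.2.2)) 7 = j := by
  rw [show (l.foldl (fun best insn => min best (pvRank insn.2.1 insn.2.2)) 7)
        = (l.map (fun insn => pvRank insn.2.1 insn.2.2)).foldl min 7 from (List.foldl_map).symm]
  obtain ⟨x, hx, hxr⟩ := hub
  have hle := PySem.List.foldl_min_le (l.map (fun insn => pvRank insn.2.1 insn.2.2)) 7
  have h1 : (l.map (fun insn => pvRank insn.2.1 insn.2.2)).foldl min 7 ≤ j :=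
    le_trans (hle.2 _ (List.mem_map_of_mem hx)) hxr
  have h2 := PySem.List.foldl_min_mem (l.map (fun insn => pvRank insn.2.1 insn.2.2)) 7
  rcases h2 with h2 | h2
  · omega
  · obtain ⟨x, hx, hxe⟩ := List.mem_map.mp h2
    have := hlb x hx
    omega


theorem rnk_mem1 (m : String) (h : m ∈ ["add","sub","mul","imul","div","idiv"]) : pvRnk m = 1 := by
  fin_cases h <;> decide

theorem rnk_mem2 (m : String) (h : m ∈ ["and","or","xor","not","shl","shr","rol","ror"]) : pvRnk m = 2 := by
  fin_cases h <;> decide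

theorem rnk_mem3 (m : String) (h : m ∈ ["mov","movzx","movsx","lea"]) : pvRnk m = 3 := by
  fin_cases h <;> decide

theorem rnk_mem4 (m : String) (h : m ∈ ["cmp","test"]) : pvRnk m = 4 := by
  fin_cases h <;> decide

theorem rnk_mem5 (m : String) (h : m ∈ ["jmp","je","jne","jg","jl","ja","jb","call"]) : pvRnk m = 5 := by
  fin_cases h <;> decide

theorem rnk_mem6 (m : String) (h : m ∈ ["push","pop"]) : pvRnk m = 6 := by
  fin_cases h <;> decide

theorem rnk_lb2 (m : String) (h1 : m ∉ ["add","sub","mul","imul","div","idiv"]) : 2 ≤ pvRnk m := by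
  unfold pvRnk; rw [if_neg h1]; split_ifs <;> omega

theorem rnk_lb3 (m : String) (h1 : m ∉ ["add","sub","mul","imul","div","idiv"]) (h2 : m ∉ ["and","or","xor","not","shl","shr","rol","ror"]) : 3 ≤ pvRnk m := by
  unfold pvRnk; rw [if_neg h1, if_neg h2]; split_ifs <;> omega

theorem rnk_lb4 (m : String) (h1 : m ∉ ["add","sub","mul","imul","div","idiv"]) (h2 : m ∉ ["and","or","xor","not","shl","shr","rol","ror"]) (h3 : m ∉ ["mov","movzx","movsx","lea"]) : 4 ≤ pvRnk m := by
  unfold pvRnk; rw [if_neg h1, if_neg h2, if_neg h3]; split_ifs <;> omega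

theorem rnk_lb5 (m : String) (h1 : m ∉ ["add","sub","mul","imul","div","idiv"]) (h2 : m ∉ ["and","or","xor","not","shl","shr","rol","ror"]) (h3 : m ∉ ["mov","movzx","movsx","lea"]) (h4 : m ∉ ["cmp","test"]) : 5 ≤ pvRnk m := by
  unfold pvRnk; rw [if_neg h1, if_neg h2, if_neg h3, if_neg h4]; split_ifs <;> omega

theorem rnk_lb6 (m : String) (h1 : m ∉ ["add","sub","mul","imul","div","idiv"]) (h2 : m ∉ ["and","or","xor","not","shl","shr","rol","ror"]) (h3 : m ∉ ["mov","movzx","movsx","lea"]) (h4 : m ∉ ["cmp","test"]) (h5 : m ∉ ["jmp","je","jne","jg","jl","ja","jb","call"]) : 6 ≤ pvRnk m := by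
  unfold pvRnk; rw [if_neg h1, if_neg h2, if_neg h3, if_neg h4, if_neg h5]; split_ifs <;> omega

theorem rnk_lb7 (m : String) (h1 : m ∉ ["add","sub","mul","imul","div","idiv"]) (h2 : m ∉ ["and","or","xor","not","shl","shr","rol","ror"]) (h3 : m ∉ ["mov","movzx","movsx","lea"]) (h4 : m ∉ ["cmp","test"]) (h5 : m ∉ ["jmp","je","jne","jg","jl","ja","jb","call"]) (h6 : m ∉ ["push","pop"]) : pvRnk m = 7 := by
  unfold pvRnk; rw [if_neg h1, if_neg h2, if_neg h3, if_neg h4, if_neg h5, if_neg h6]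

theorem pv_main (a : Int × String × String) (as : List (Int × String × String)) :
    categorize_handler_py (a :: as) = categorize_handler_py_alt (a :: as) := by
  have hne : (a :: as).isEmpty = false := rfl
  unfold categorize_handler_py categorize_handler_py_alt
  simp only [hne, Bool.false_eq_true, if_false]
  by_cases h0 : ((a :: as).map (fun insn => insn.2.2)).any
      (fun op => PySem.Str.isIn "fs:[0x30]" op || PySem.Str.isIn "gs:[0x30]" op) = true
  · simp only [h0, if_true]
    simp only [List.any_map, List.any_eq_true, Function.comp] at h0
    obtain ⟨x, hx, hxp⟩ := h0
    rw [fold_eq (a :: as) 0 (by omega)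
        ⟨x, hx, by rw [rank_zero_of_anti _ _ hxp]⟩ (fun x _ => Nat.zero_le _)]
    rfl
  have hop : ∀ x ∈ a :: as,
      ¬ ((PySem.Str.isIn "fs:[0x30]" x.2.2 || PySem.Str.isIn "gs:[0x30]" x.2.2) = true) := by
    intro x hx hc
    exact h0 (by simp only [List.any_map, List.any_eq_true, Function.comp]; exact ⟨x, hx, hc⟩)
  rw [Bool.not_eq_true] at h0
  simp only [h0, Bool.false_eq_true, if_false]
  by_cases hrd : ((a :: as).map (fun insn => insn.2.1)).contains "rdtsc" = true
  · simp only [hrd, if_true]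
    simp only [List.contains_iff_mem, List.mem_map] at hrd
    obtain ⟨x, hx, hxm⟩ := hrd
    rw [fold_eq (a :: as) 0 (by omega)
        ⟨x, hx, by rw [rank_zero_of_mnem _ _ (Or.inl hxm)]⟩ (fun x _ => Nat.zero_le _)]
    rfl
  have hnrd : ∀ x ∈ a :: as, x.2.1 ≠ "rdtsc" := by
    intro x hx hc
    exact hrd (by simp only [List.contains_iff_mem, List.mem_map]; exact ⟨x, hx, hc⟩)
  rw [Bool.not_eq_true] at hrd
  simp only [hrd, Bool.false_eq_true, if_false]
  by_cases hcp : ((a :: as).map (fun insn => insn.2.1)).any (fun m => ["cpuid"].contains m) = true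
  · simp only [hcp, if_true]
    simp only [List.any_map, List.any_eq_true, Function.comp, List.contains_iff_mem,
      List.mem_singleton] at hcp
    obtain ⟨x, hx, hxm⟩ := hcp
    rw [fold_eq (a :: as) 0 (by omega)
        ⟨x, hx, by rw [rank_zero_of_mnem _ _ (Or.inr hxm)]⟩ (fun x _ => Nat.zero_le _)]
    rfl
  have hncp : ∀ x ∈ a :: as, x.2.1 ≠ "cpuid" := by
    intro x hx hc
    exact hcp (by
      simp only [List.any_map, List.any_eq_true, Function.comp, List.contains_iff_mem,
        List.mem_singleton]
      exact ⟨x, hx, hc⟩)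
  rw [Bool.not_eq_true] at hcp
  simp only [hcp, Bool.false_eq_true, if_false]
  have hclean : ∀ x ∈ a :: as, pvRank x.2.1 x.2.2 = pvRnk x.2.1 := fun x hx =>
    rank_of_clean _ _ (hop x hx) (hnrd x hx) (hncp x hx)
  by_cases hc1 : ((a :: as).map (fun insn => insn.2.1)).any (fun m => ["add","sub","mul","imul","div","idiv"].contains m) = true
  · simp only [hc1, if_true]
    simp only [List.any_map, List.any_eq_true, Function.comp, List.contains_iff_mem] at hc1
    obtain ⟨x, hx, hxm⟩ := hc1
    rw [fold_eq (a :: as) 1 (by omega)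
        ⟨x, hx, by rw [hclean x hx, rnk_mem1 _ hxm]⟩
        (fun x hx => by
          rw [hclean x hx]
          unfold pvRnk; split_ifs <;> omega)]
    rfl
  have hm1 : ∀ x ∈ a :: as, x.2.1 ∉ ["add","sub","mul","imul","div","idiv"] := by
    intro x hx hc
    exact hc1 (by
      simp only [List.any_map, List.any_eq_true, Function.comp, List.contains_iff_mem]
      exact ⟨x, hx, hc⟩)
  rw [Bool.not_eq_true] at hc1
  simp only [hc1, Bool.false_eq_true, if_false]
  by_cases hc2 : ((a :: as).map (fun insn => insn.2.1)).any (fun m => ["and","or","xor","not","shl","shr","rol","ror"].contains m) = true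
  · simp only [hc2, if_true]
    simp only [List.any_map, List.any_eq_true, Function.comp, List.contains_iff_mem] at hc2
    obtain ⟨x, hx, hxm⟩ := hc2
    rw [fold_eq (a :: as) 2 (by omega)
        ⟨x, hx, by rw [hclean x hx, rnk_mem2 _ hxm]⟩
        (fun x hx => by
          rw [hclean x hx]
          exact rnk_lb2 x.2.1 (hm1 x hx))]
    rfl
  have hm2 : ∀ x ∈ a :: as, x.2.1 ∉ ["and","or","xor","not","shl","shr","rol","ror"] := by
    intro x hx hc
    exact hc2 (by
      simp only [List.any_map, List.any_eq_true, Function.comp, List.contains_iff_mem]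
      exact ⟨x, hx, hc⟩)
  rw [Bool.not_eq_true] at hc2
  simp only [hc2, Bool.false_eq_true, if_false]
  by_cases hc3 : ((a :: as).map (fun insn => insn.2.1)).any (fun m => ["mov","movzx","movsx","lea"].contains m) = true
  · simp only [hc3, if_true]
    simp only [List.any_map, List.any_eq_true, Function.comp, List.contains_iff_mem] at hc3
    obtain ⟨x, hx, hxm⟩ := hc3
    rw [fold_eq (a :: as) 3 (by omega)
        ⟨x, hx, by rw [hclean x hx, rnk_mem3 _ hxm]⟩
        (fun x hx => by
          rw [hclean x hx]
          exact rnk_lb3 x.2.1 (hm1 x hx) (hm2 x hx))]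
    rfl
  have hm3 : ∀ x ∈ a :: as, x.2.1 ∉ ["mov","movzx","movsx","lea"] := by
    intro x hx hc
    exact hc3 (by
      simp only [List.any_map, List.any_eq_true, Function.comp, List.contains_iff_mem]
      exact ⟨x, hx, hc⟩)
  rw [Bool.not_eq_true] at hc3
  simp only [hc3, Bool.false_eq_true, if_false]
  by_cases hc4 : ((a :: as).map (fun insn => insn.2.1)).any (fun m => ["cmp","test"].contains m) = true
  · simp only [hc4, if_true]
    simp only [List.any_map, List.any_eq_true, Function.comp, List.contains_iff_mem] at hc4
    obtain ⟨x, hx, hxm⟩ := hc4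
    rw [fold_eq (a :: as) 4 (by omega)
        ⟨x, hx, by rw [hclean x hx, rnk_mem4 _ hxm]⟩
        (fun x hx => by
          rw [hclean x hx]
          exact rnk_lb4 x.2.1 (hm1 x hx) (hm2 x hx) (hm3 x hx))]
    rfl
  have hm4 : ∀ x ∈ a :: as, x.2.1 ∉ ["cmp","test"] := by
    intro x hx hc
    exact hc4 (by
      simp only [List.any_map, List.any_eq_true, Function.comp, List.contains_iff_mem]
      exact ⟨x, hx, hc⟩)
  rw [Bool.not_eq_true] at hc4
  simp only [hc4, Bool.false_eq_true, if_false]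
  by_cases hc5 : ((a :: as).map (fun insn => insn.2.1)).any (fun m => ["jmp","je","jne","jg","jl","ja","jb","call"].contains m) = true
  · simp only [hc5, if_true]
    simp only [List.any_map, List.any_eq_true, Function.comp, List.contains_iff_mem] at hc5
    obtain ⟨x, hx, hxm⟩ := hc5
    rw [fold_eq (a :: as) 5 (by omega)
        ⟨x, hx, by rw [hclean x hx, rnk_mem5 _ hxm]⟩
        (fun x hx => by
          rw [hclean x hx]
          exact rnk_lb5 x.2.1 (hm1 x hx) (hm2 x hx) (hm3 x hx) (hm4 x hx))]
    rfl
  have hm5 : ∀ x ∈ a :: as, x.2.1 ∉ ["jmp","je","jne","jg","jl","ja","jb","call"] := by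
    intro x hx hc
    exact hc5 (by
      simp only [List.any_map, List.any_eq_true, Function.comp, List.contains_iff_mem]
      exact ⟨x, hx, hc⟩)
  rw [Bool.not_eq_true] at hc5
  simp only [hc5, Bool.false_eq_true, if_false]
  by_cases hc6 : ((a :: as).map (fun insn => insn.2.1)).any (fun m => ["push","pop"].contains m) = true
  · simp only [hc6, if_true]
    simp only [List.any_map, List.any_eq_true, Function.comp, List.contains_iff_mem] at hc6
    obtain ⟨x, hx, hxm⟩ := hc6
    rw [fold_eq (a :: as) 6 (by omega)
        ⟨x, hx, by rw [hclean x hx, rnk_mem6 _ hxm]⟩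
        (fun x hx => by
          rw [hclean x hx]
          exact rnk_lb6 x.2.1 (hm1 x hx) (hm2 x hx) (hm3 x hx) (hm4 x hx) (hm5 x hx))]
    rfl
  have hm6 : ∀ x ∈ a :: as, x.2.1 ∉ ["push","pop"] := by
    intro x hx hc
    exact hc6 (by
      simp only [List.any_map, List.any_eq_true, Function.comp, List.contains_iff_mem]
      exact ⟨x, hx, hc⟩)
  rw [Bool.not_eq_true] at hc6
  simp only [hc6, Bool.false_eq_true, if_false]
  rw [fold_eq (a :: as) 7 (by omega)
      ⟨a, List.mem_cons_self, by
        rw [hclean a List.mem_cons_self,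
          rnk_lb7 a.2.1 (hm1 a List.mem_cons_self) (hm2 a List.mem_cons_self) (hm3 a List.mem_cons_self) (hm4 a List.mem_cons_self) (hm5 a List.mem_cons_self) (hm6 a List.mem_cons_self)]⟩
      (fun x hx => by rw [hclean x hx, rnk_lb7 x.2.1 (hm1 x hx) (hm2 x hx) (hm3 x hx) (hm4 x hx) (hm5 x hx) (hm6 x hx)])]
  rfl

-- ===== VERDICT (by name: the statement is the Claim_ definition above) =====
theorem categorize_handler_py_spec : Claim_equal_categorize_handler_py := by
  intro l _hd
  unfold Spec_categorize_handler_py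
  cases l with
  | nil => rfl
  | cons a as => exact pv_main a as
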